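-- pv_equiv track=rewrite | github.com/sumanth-lingappa/justforfun | flames/flames.py | strike_common_chars
-- ===== SOURCE A (Python) =====
-- def strike_common_chars(partner1, partner2):
--     partner1_char_count = {}
--     for c in partner1:
--         partner1_char_count[c] = partner1_char_count.setdefault(c, 0) + 1
--
--     partner2_char_count = {}
--     for c in partner2:
--         partner2_char_count[c] = partner2_char_count.setdefault(c, 0) + 1
--
--     for c in partner1_char_count.keys():
--         if c in partner2:
--             partner1_char_count[c] -= 1
--             partner2_char_count[c] -= 1
--
--     return sum(partner1_char_count.values()) + sum(partner2_char_count.values())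
-- ===== SOURCE B (Python) =====
-- def strike_common_chars(partner1, partner2):
--     return len(partner1) + len(partner2) - 2 * len(set(partner1) & set(partner2))
-- ===== Notes on version B (the rewrite author's own statement) =====
-- stated objective: simpler
-- what changed: Replaced A's two character-count dicts plus a per-distinct-char subtraction loop with the one-line closed form len(p1) + len(p2) - 2*len(set(p1) & set(p2)), since each distinct shared character removes exactly one occurrence from each side.
import Mathlib
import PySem

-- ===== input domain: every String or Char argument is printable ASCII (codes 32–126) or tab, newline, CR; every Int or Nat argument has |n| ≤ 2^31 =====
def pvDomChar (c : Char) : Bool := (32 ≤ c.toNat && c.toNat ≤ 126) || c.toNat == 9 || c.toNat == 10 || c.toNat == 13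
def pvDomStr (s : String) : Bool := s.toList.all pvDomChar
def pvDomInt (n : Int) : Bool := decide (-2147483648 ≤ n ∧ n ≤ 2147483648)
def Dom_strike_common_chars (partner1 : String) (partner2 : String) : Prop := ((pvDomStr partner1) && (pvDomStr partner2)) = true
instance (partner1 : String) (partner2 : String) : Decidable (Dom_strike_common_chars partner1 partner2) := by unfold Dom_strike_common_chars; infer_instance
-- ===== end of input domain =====

-- B replaces A's two counting dicts and subtraction loop with the closed form
-- len(p1) + len(p2) - 2*|set(p1) & set(p2)| (objective: simpler).

-- ===== PORT A =====
-- Literal port of A: two counter dicts built by `d[c] = d.setdefault(c,0)+1`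
-- (= insert c (getD c 0 + 1)), then a loop over d1's keys decrementing both
-- counts when c occurs in partner2 (single-char `c in partner2` is exactly
-- membership in partner2's char list), then the two value sums.
def strike_common_chars (partner1 : String) (partner2 : String) : Int :=
  let partner1_char_count : PySem.Dict Char Int :=
    partner1.toList.foldl (fun d c => d.insert c (d.getD c 0 + 1)) PySem.Dict.empty
  let partner2_char_count : PySem.Dict Char Int :=
    partner2.toList.foldl (fun d c => d.insert c (d.getD c 0 + 1)) PySem.Dict.empty
  let st :=
    partner1_char_count.keys.foldl
      (fun (st : PySem.Dict Char Int × PySem.Dict Char Int) c =>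
        if partner2.toList.contains c then
          (st.1.modify c 0 (fun v => v - 1), st.2.modify c 0 (fun v => v - 1))
        else st)
      (partner1_char_count, partner2_char_count)
  st.1.values.sum + st.2.values.sum

-- ===== PORT B =====
def strike_common_chars_alt (partner1 : String) (partner2 : String) : Int :=
  PySem.Str.len partner1 + PySem.Str.len partner2 -
    2 * PySem.Set.len (PySem.Set.inter (PySem.Set.ofList partner1.toList)
                                       (PySem.Set.ofList partner2.toList))

-- ===== PRECONDITION & SPEC =====
def Spec_strike_common_chars (partner1 : String) (partner2 : String) (out : Int) : Prop := out = strike_common_chars_alt partner1 partner2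
instance (partner1 : String) (partner2 : String) (out : Int) : Decidable (Spec_strike_common_chars partner1 partner2 out) := by unfold Spec_strike_common_chars; infer_instance

-- ===== CLAIM (what is proved, stated in full; the proofs are below) =====
def Claim_equal_strike_common_chars : Prop := ∀ (partner1 : String) (partner2 : String), Dom_strike_common_chars partner1 partner2 → Spec_strike_common_chars partner1 partner2 (strike_common_chars partner1 partner2)

-- ===== LEMMAS AND PROOFS =====

-- A single decrement `modify c 0 (· - 1)` lowers the sum of a dict's values by 1
-- (whether or not c is a key), as long as the keys are duplicate-free.
lemma values_sum_modify_sub_one (d : PySem.Dict Char Int) (c : Char)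
    (hnd : d.keys.Nodup) :
    (d.modify c 0 (fun v => v - 1)).values.sum = d.values.sum - 1 := by
  show (d.insert c (d.getD c 0 - 1)).values.sum = d.values.sum - 1
  by_cases hc : d.contains c = true
  · obtain ⟨v, hv⟩ := Option.isSome_iff_exists.mp ((PySem.Dict.contains_eq_isSome_get? d c) ▸ hc)
    have hitems : (c, v) ∈ d.items := PySem.Dict.mem_items_of_get?_eq_some d hv
    obtain ⟨pre, post, hsplit⟩ := List.append_of_mem hitems
    have hv' : d.getD c 0 = v := PySem.Dict.getD_of_mem_items d hitems hnd 0
    have hkeys : d.keys = pre.map Prod.fst ++ c :: post.map Prod.fst := by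
      simp [PySem.Dict.keys, hsplit]
    rw [hkeys] at hnd
    have hnodup := List.nodup_append.mp hnd
    have hpre : pre.map (fun p => if (p.1 == c) = true then (c, d.getD c 0 - 1) else p) = pre := by
      rw [List.map_congr_left (g := id) (fun q hq => ?_), List.map_id]
      have hne : q.1 ≠ c := hnodup.2.2 q.1 (List.mem_map_of_mem hq) c (by simp)
      simp [hne]
    have hpost : post.map (fun p => if (p.1 == c) = true then (c, d.getD c 0 - 1) else p) = post := by
      rw [List.map_congr_left (g := id) (fun q hq => ?_), List.map_id]
      have hne : q.1 ≠ c := by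
        intro hqc
        have hmm := List.mem_map_of_mem (f := Prod.fst) hq
        rw [hqc] at hmm
        exact (List.nodup_cons.mp hnodup.2.1).1 hmm
      simp [hne]
    rw [PySem.Dict.values, PySem.Dict.items_insert_of_contains d _ hc, hsplit]
    rw [PySem.Dict.values, hsplit]
    simp only [List.map_append, List.map_cons, List.sum_append, List.sum_cons, hpre, hpost]
    simp [hv']
    omega
  · simp only [Bool.not_eq_true] at hc
    rw [PySem.Dict.values, PySem.Dict.items_insert_of_not_contains d _ hc,
        PySem.Dict.getD_of_not_contains d 0 hc, PySem.Dict.values]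
    simp
    omega

-- Nodup keys survive a modify.
lemma nodup_keys_modify (d : PySem.Dict Char Int) (c : Char) (f : Int → Int)
    (hnd : d.keys.Nodup) : (d.modify c 0 f).keys.Nodup := by
  rw [PySem.Dict.keys_modify]
  by_cases hc : d.contains c = true
  · rw [PySem.Dict.keys_insert_of_contains d _ hc]; exact hnd
  · simp only [Bool.not_eq_true] at hc
    rw [PySem.Dict.keys_insert_of_not_contains d _ hc]
    refine List.nodup_append.mpr ⟨hnd, List.nodup_singleton c, ?_⟩
    intro a ha b hb
    simp at hb
    subst hb
    intro h
    subst h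
    exact absurd ((PySem.Dict.contains_iff_mem_keys d a).mpr ha) (by simp [hc])

-- The subtraction loop over one dict lowers its value sum by the number of
-- processed keys satisfying the test.
lemma sub_loop (Q : Char → Bool) (ks : List Char) :
    ∀ d : PySem.Dict Char Int, d.keys.Nodup →
    (ks.foldl (fun d c => if Q c then d.modify c 0 (fun v => v - 1) else d) d).values.sum
      = d.values.sum - (ks.countP Q : Int) := by
  induction ks with
  | nil => intro d _; simp
  | cons c ks ih =>
    intro d hnd
    simp only [List.foldl_cons, List.countP_cons]
    by_cases hq : Q c = true
    · rw [if_pos hq, ih _ (nodup_keys_modify d c _ hnd), values_sum_modify_sub_one d c hnd]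
      simp [hq]
      omega
    · simp only [Bool.not_eq_true] at hq
      rw [if_neg (by simp [hq]), ih d hnd]
      simp [hq]

-- The value sum of a counter dict is the length of the counted list.
lemma values_sum_counter (l : List Char) :
    (PySem.Dict.counter l : PySem.Dict Char Int).values.sum = (l.length : Int) := by
  rw [PySem.Dict.values, PySem.Dict.items_counter]
  rw [List.map_map]
  have hperm : (PySem.Set.ofList l).Perm l.dedup :=
    (List.perm_ext_iff_of_nodup (PySem.Set.nodup_ofList l) l.nodup_dedup).mpr
      (fun a => by rw [PySem.Set.mem_ofList, List.mem_dedup])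
  rw [List.Perm.sum_eq (List.Perm.map _ hperm)]
  have heq : List.map ((fun x => x.2) ∘ fun k => (k, (List.count k l : Int))) l.dedup
      = List.map (fun k => ((List.count k l : Nat) : Int)) l.dedup := by rfl
  have h2 : (List.map (fun k => ((List.count k l : Nat) : Int)) l.dedup).sum
      = ((List.map (fun k => List.count k l) l.dedup).sum : Int) := by
    rw [Nat.cast_list_sum, List.map_map]
    rfl
  rw [heq, h2, List.sum_map_count_dedup_eq_length]

theorem strike_common_chars_spec : Claim_equal_strike_common_chars := by
  intro partner1 partner2 _
  unfold Spec_strike_common_chars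
  simp only [strike_common_chars, strike_common_chars_alt,
    PySem.Dict.foldl_insert_getD_add_one_eq_counter]
  set l1 := partner1.toList with hl1
  set l2 := partner2.toList with hl2
  have hprod : ∀ (ks : List Char) (a b : PySem.Dict Char Int),
      ks.foldl (fun (st : PySem.Dict Char Int × PySem.Dict Char Int) c =>
        if l2.contains c then
          (st.1.modify c 0 (fun v => v - 1), st.2.modify c 0 (fun v => v - 1))
        else st) (a, b)
      = (ks.foldl (fun (d : PySem.Dict Char Int) c =>
            if l2.contains c then d.modify c 0 (fun v => v - 1) else d) a,
         ks.foldl (fun (d : PySem.Dict Char Int) c =>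
            if l2.contains c then d.modify c 0 (fun v => v - 1) else d) b) := by
    intro ks a b
    rw [show (fun (st : PySem.Dict Char Int × PySem.Dict Char Int) c =>
        if l2.contains c then
          (st.1.modify c 0 (fun v => v - 1), st.2.modify c 0 (fun v => v - 1))
        else st)
      = (fun (st : PySem.Dict Char Int × PySem.Dict Char Int) c =>
          ((fun (d : PySem.Dict Char Int) c =>
              if l2.contains c then d.modify c 0 (fun v => v - 1) else d) st.1 c,
           (fun (d : PySem.Dict Char Int) c =>
              if l2.contains c then d.modify c 0 (fun v => v - 1) else d) st.2 c))
      from by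
        funext st c
        by_cases h : l2.contains c = true
        · simp only [if_pos h]
        · simp only [if_neg h]]
    exact PySem.List.foldl_prod_mk
      (fun (d : PySem.Dict Char Int) c =>
        if l2.contains c = true then d.modify c 0 (fun v => v - 1) else d)
      (fun (d : PySem.Dict Char Int) c =>
        if l2.contains c = true then d.modify c 0 (fun v => v - 1) else d) ks a b
  rw [hprod]
  rw [sub_loop _ _ _ (PySem.Dict.nodup_keys_counter l1),
      sub_loop _ _ _ (PySem.Dict.nodup_keys_counter l2),
      values_sum_counter, values_sum_counter]
  rw [PySem.Dict.keys_counter]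
  rw [PySem.Str.len_eq, PySem.Str.len_eq, ← hl1, ← hl2]
  have hlen : PySem.Set.len (PySem.Set.inter (PySem.Set.ofList l1) (PySem.Set.ofList l2))
      = ((PySem.Set.ofList l1).countP (fun c => l2.contains c) : Int) := by
    simp only [PySem.Set.len, PySem.Set.inter, List.countP_eq_length_filter]
    congr 2
    apply List.filter_congr
    intro x hx
    by_cases h : x ∈ l2 <;> simp [PySem.Set.mem_ofList, h]
  rw [hlen]
  ring
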